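-- pv_equiv track=rewrite | github.com/atom-computers/atomos | core/atomos-agents/tests/test_cli_bridge_integration.py | _parse_exit_code
-- ===== SOURCE A (Python) =====
-- def _parse_exit_code(output: str) -> int:
--     for line in reversed(output.splitlines()):
--         line = line.strip()
--         if line.startswith("[exit ") and line.endswith("]"):
--             try:
--                 return int(line[6:-1])
--             except ValueError:
--                 pass
--     return 0
-- ===== SOURCE B (Python) =====
-- def _parse_exit_code(output: str) -> int:
--     result = 0
--     for line in output.splitlines():
--         line = line.strip()
--         if line.startswith("[exit ") and line.endswith("]"):
--             try:
--                 result = int(line[6:-1])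
--             except ValueError:
--                 pass
--     return result
-- ===== Notes on version B (the rewrite author's own statement) =====
-- stated objective: alternative
-- what changed: Replaces the reverse scan with early return by a single forward pass over the lines that keeps the last successfully parsed marker in an accumulator.
import Mathlib
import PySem

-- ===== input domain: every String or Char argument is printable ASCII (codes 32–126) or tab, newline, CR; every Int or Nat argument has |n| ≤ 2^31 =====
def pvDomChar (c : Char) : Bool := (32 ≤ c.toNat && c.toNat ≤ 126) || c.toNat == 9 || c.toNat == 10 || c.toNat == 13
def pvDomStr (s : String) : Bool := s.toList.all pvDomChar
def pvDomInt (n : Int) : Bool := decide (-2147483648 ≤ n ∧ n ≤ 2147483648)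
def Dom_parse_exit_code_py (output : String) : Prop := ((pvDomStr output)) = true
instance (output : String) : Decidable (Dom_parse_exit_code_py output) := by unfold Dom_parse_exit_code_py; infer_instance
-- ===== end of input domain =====

-- B replaces A's reverse scan with early return by one forward pass keeping the last parsed marker (alternative decomposition; same cost).

-- ===== PORT A =====
-- for line in reversed(output.splitlines()): return on first parsed marker
def pvGoA : List String → Int
  | [] => 0
  | l :: rest =>
    let line := PySem.Str.strip l
    if PySem.Str.startswith line "[exit " && PySem.Str.endswith line "]" then
      match PySem.Int.ofStr? (PySem.Str.slice line (some 6) (some (-1))) with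
      | some n => n
      | none => pvGoA rest
    else pvGoA rest

def parse_exit_code_py (output : String) : Int :=
  pvGoA (PySem.Str.splitlines output).reverse

-- ===== PORT B =====
-- forward fold over the lines; a successful parse overwrites the accumulator
def parse_exit_code_py_alt (output : String) : Int :=
  (PySem.Str.splitlines output).foldl (fun acc l =>
    let line := PySem.Str.strip l
    if PySem.Str.startswith line "[exit " && PySem.Str.endswith line "]" then
      match PySem.Int.ofStr? (PySem.Str.slice line (some 6) (some (-1))) with
      | some n => n
      | none => acc
    else acc) 0

-- ===== PRECONDITION & SPEC =====
def Spec_parse_exit_code_py (output : String) (out : Int) : Prop := out = parse_exit_code_py_alt output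
instance (output : String) (out : Int) : Decidable (Spec_parse_exit_code_py output out) := by unfold Spec_parse_exit_code_py; infer_instance

-- ===== CLAIM (what is proved, stated in full; the proofs are below) =====
def Claim_equal_parse_exit_code_py : Prop := ∀ (output : String), Dom_parse_exit_code_py output → Spec_parse_exit_code_py output (parse_exit_code_py output)

-- ===== LEMMAS AND PROOFS =====

-- the per-line parse: some n if the stripped line is a marker with a parseable code
def pvParseLine (l : String) : Option Int :=
  let line := PySem.Str.strip l
  if PySem.Str.startswith line "[exit " && PySem.Str.endswith line "]" then
    PySem.Int.ofStr? (PySem.Str.slice line (some 6) (some (-1)))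
  else none

theorem pvGoA_eq (rs : List String) : pvGoA rs = (rs.filterMap pvParseLine).headD 0 := by
  induction rs with
  | nil => rfl
  | cons l rest ih =>
    rw [List.filterMap_cons]
    cases hpl : pvParseLine l with
    | none =>
      unfold pvGoA
      unfold pvParseLine at hpl
      dsimp only at hpl ⊢
      split_ifs at hpl ⊢ with h
      · rw [hpl]; exact ih
      · exact ih
    | some n =>
      unfold pvGoA
      unfold pvParseLine at hpl
      dsimp only at hpl ⊢
      split_ifs at hpl ⊢ with h
      rw [hpl]
      rfl

theorem pvFoldB_eq (ls : List String) (acc : Int) :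
    ls.foldl (fun acc l =>
      let line := PySem.Str.strip l
      if PySem.Str.startswith line "[exit " && PySem.Str.endswith line "]" then
        match PySem.Int.ofStr? (PySem.Str.slice line (some 6) (some (-1))) with
        | some n => n
        | none => acc
      else acc) acc
    = (ls.reverse.filterMap pvParseLine).headD acc := by
  induction ls using List.reverseRecOn with
  | nil => rfl
  | append_singleton rest l ih =>
    rw [List.foldl_append, List.foldl_cons, List.foldl_nil, List.reverse_append,
      List.reverse_singleton, List.singleton_append, List.filterMap_cons, ih]
    cases hpl : pvParseLine l with
    | none =>
      unfold pvParseLine at hpl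
      dsimp only at hpl ⊢
      split_ifs at hpl ⊢ with h
      · rw [hpl]
      · rfl
    | some n =>
      unfold pvParseLine at hpl
      dsimp only at hpl ⊢
      split_ifs at hpl ⊢ with h
      rw [hpl]
      rfl

-- ===== VERDICT (by name: the statement is the Claim_ definition above) =====
theorem parse_exit_code_py_spec : Claim_equal_parse_exit_code_py := by
  intro output _
  unfold Spec_parse_exit_code_py parse_exit_code_py parse_exit_code_py_alt
  rw [pvGoA_eq, pvFoldB_eq]
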